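-- pv_equiv track=rewrite | github.com/dcheng728/brane_solns | src/sugra/forms.py | _sort_with_sign
-- ===== SOURCE A (Python) =====
-- def _sort_with_sign(idx):
--     """Sort an index tuple and return (sorted_tuple, sign).
--
--     The sign accounts for the number of transpositions needed.
--     """
--     idx = list(idx)
--     n = len(idx)
--     sign = 1
--     # Bubble sort tracking sign
--     for i in range(n):
--         for j in range(i + 1, n):
--             if idx[i] > idx[j]:
--                 idx[i], idx[j] = idx[j], idx[i]
--                 sign *= -1
--             elif idx[i] == idx[j]:
--                 return tuple(idx), 0
--     return tuple(idx), sign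
-- ===== SOURCE B (Python) =====
-- def _sort_with_sign(idx):
--     """Sort an index tuple and return (sorted_tuple, sign) via merge-sort inversion counting."""
--     def msort(l):
--         if len(l) < 2:
--             return l, 0
--         mid = len(l) // 2
--         left, li = msort(l[:mid])
--         right, ri = msort(l[mid:])
--         merged = []
--         inv = li + ri
--         i = j = 0
--         while i < len(left) and j < len(right):
--             if left[i] <= right[j]:
--                 merged.append(left[i])
--                 i += 1
--             else:
--                 merged.append(right[j])
--                 j += 1
--                 inv += len(left) - i
--         merged.extend(left[i:])
--         merged.extend(right[j:])
--         return merged, inv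
--     s, inv = msort(list(idx))
--     for k in range(len(s) - 1):
--         if s[k] == s[k + 1]:
--             return tuple(s), 0
--     return tuple(s), -1 if inv % 2 else 1
-- ===== Notes on version B (the rewrite author's own statement) =====
-- stated objective: alternative
-- what changed: Replaced the swap-counting selection/bubble sort (sign flipped per swap, early return on an equal pair) by a merge sort that counts inversions (sign = parity of inversions) plus an adjacent-equal scan of the sorted output for the duplicate case.
-- outside the precondition, e.g. on _sort_with_sign([2, 1, 1]): A returns ((1, 2, 1), 0), B returns ((1, 1, 2), 0)
import Mathlib
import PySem

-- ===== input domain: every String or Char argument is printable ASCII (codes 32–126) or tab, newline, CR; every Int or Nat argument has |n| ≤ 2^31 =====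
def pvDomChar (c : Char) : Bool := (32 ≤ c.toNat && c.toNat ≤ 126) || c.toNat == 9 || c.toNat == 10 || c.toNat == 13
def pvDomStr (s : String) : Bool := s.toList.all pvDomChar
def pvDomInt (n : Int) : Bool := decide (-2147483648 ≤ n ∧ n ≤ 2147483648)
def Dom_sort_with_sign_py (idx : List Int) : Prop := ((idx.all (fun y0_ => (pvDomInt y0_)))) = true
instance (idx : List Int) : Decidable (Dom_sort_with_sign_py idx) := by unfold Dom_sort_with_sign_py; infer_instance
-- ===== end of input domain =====

-- B replaces A's quadratic swap-counting selection sort by a merge sort that counts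
-- inversions (sign = parity of inversions) and scans the sorted output for a duplicate.

-- ===== PORT A =====
-- one comparison step of A's inner loop: Sum.inl = still looping, Sum.inr = already returned
def aStep (i j : Nat) (st : (List Int × Int) ⊕ (List Int × Int)) : (List Int × Int) ⊕ (List Int × Int) :=
  match st with
  | .inr r => .inr r
  | .inl (l, sign) =>
    let vi := l.getD i 0
    let vj := l.getD j 0
    if vj < vi then .inl ((l.set i vj).set j vi, sign * (-1))
    else if vi = vj then .inr (l, 0)
    else .inl (l, sign)

def sort_with_sign_py (idx : List Int) : List Int × Int :=
  let n := idx.length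
  match (List.range n).foldl
      (fun st i => (List.range' (i+1) (n - (i+1))).foldl (fun st j => aStep i j st) st)
      (Sum.inl (idx, 1)) with
  | .inl (l, s) => (l, s)
  | .inr (l, s) => (l, s)

-- ===== PORT B =====
-- merge two runs, counting cross inversions (Source B's merge while-loop as recursion on the
-- two runs; the Nat argument is only a structural-recursion fuel, always ≥ the total length)
def bMerge : Nat → List Int → List Int → List Int × Int
  | 0, a, b => (a ++ b, 0)
  | _ + 1, [], b => (b, 0)
  | _ + 1, a, [] => (a, 0)
  | fuel + 1, x :: a, y :: b =>
    if x ≤ y then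
      let r := bMerge fuel a (y :: b); (x :: r.1, r.2)
    else
      let r := bMerge fuel (x :: a) b; (y :: r.1, r.2 + ((x :: a).length : Int))

def bMsort : Nat → List Int → List Int × Int
  | 0, l => (l, 0)
  | fuel + 1, l =>
    if l.length < 2 then (l, 0)
    else
      let mid := l.length / 2
      let L := bMsort fuel (l.take mid)
      let R := bMsort fuel (l.drop mid)
      let M := bMerge (L.1.length + R.1.length) L.1 R.1
      (M.1, L.2 + R.2 + M.2)

-- Source B's scan of the sorted output for an adjacent duplicate
def adjDup : List Int → Bool
  | x :: y :: t => x == y || adjDup (y :: t)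
  | _ => false

def sort_with_sign_py_alt (idx : List Int) : List Int × Int :=
  let r := bMsort idx.length idx
  if adjDup r.1 then (r.1, 0)
  else (r.1, if PySem.Int.mod r.2 2 ≠ 0 then -1 else 1)

-- ===== PRECONDITION & SPEC =====
-- Pre_ excludes index lists with a repeated entry: both programs return sign 0 there, but A
-- early-returns whatever partially sorted tuple its in-place state holds at that moment while
-- B returns the fully sorted tuple — with sign 0 either companion tuple is equally defensible
-- (in the repository the whole term vanishes), so no one would specify either.
def Pre_sort_with_sign_py (idx : List Int) : Prop := idx.Nodup
instance (idx : List Int) : Decidable (Pre_sort_with_sign_py idx) := by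
  unfold Pre_sort_with_sign_py; infer_instance

def pvWitness_sort_with_sign_py : List Int := [3, 1, 2]

def Spec_sort_with_sign_py (idx : List Int) (out : List Int × Int) : Prop :=
  out = sort_with_sign_py_alt idx
instance (idx : List Int) (out : List Int × Int) : Decidable (Spec_sort_with_sign_py idx out) := by
  unfold Spec_sort_with_sign_py; infer_instance

-- ===== CLAIM (what is proved, stated in full; the proofs are below) =====
def Claim_equal_sort_with_sign_py : Prop :=
  ∀ (idx : List Int), Dom_sort_with_sign_py idx → Pre_sort_with_sign_py idx →
    Spec_sort_with_sign_py idx (sort_with_sign_py idx)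

-- ===== LEMMAS AND PROOFS =====

-- number of inversions of a list (pairs earlier > later)
def invc : List Int → Nat
  | [] => 0
  | x :: t => t.countP (fun y => decide (y < x)) + invc t

-- A's inner pass in functional form: from current head m over the tail, return
-- (minimum, rearranged tail, number of swaps); none = equality hit (early return)
def ip : Int → List Int → Option (Int × List Int × Nat)
  | m, [] => some (m, [], 0)
  | m, y :: ys =>
    if y < m then (ip y ys).map (fun p => (p.1, m :: p.2.1, p.2.2 + 1))
    else if m = y then none
    else (ip m ys).map (fun p => (p.1, y :: p.2.1, p.2.2))

theorem ip_length (rest : List Int) : ∀ {m μ : Int} {zs : List Int} {k : Nat},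
    ip m rest = some (μ, zs, k) → zs.length = rest.length := by
  induction rest with
  | nil => intro m μ zs k h; simp [ip] at h; simp [h.2.1]
  | cons y ys ih =>
    intro m μ zs k h
    simp only [ip] at h
    by_cases h1 : y < m
    · rw [if_pos h1] at h
      cases hip : ip y ys with
      | none => rw [hip] at h; simp at h
      | some p =>
        obtain ⟨μ', zs', k'⟩ := p
        rw [hip, Option.map_some] at h
        simp only [Option.some.injEq, Prod.mk.injEq] at h
        obtain ⟨hA, hB, hC⟩ := h; subst hA; subst hB; subst hC
        simpa using ih hip
    · by_cases h2 : m = y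
      · rw [if_neg h1, if_pos h2] at h; simp at h
      · rw [if_neg h1, if_neg h2] at h
        cases hip : ip m ys with
        | none => rw [hip] at h; simp at h
        | some p =>
          obtain ⟨μ', zs', k'⟩ := p
          rw [hip, Option.map_some] at h
          simp only [Option.some.injEq, Prod.mk.injEq] at h
          obtain ⟨hA, hB, hC⟩ := h; subst hA; subst hB; subst hC
          simpa using ih hip

-- A's whole algorithm in functional form (junk in the none branch; never reached on Nodup input)
def selSW : List Int → List Int × Nat
  | [] => ([], 0)
  | m :: rest =>
    match h : ip m rest with
    | some (μ, zs, _k) => let r := selSW zs; (μ :: r.1, _k + r.2)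
    | none => (m :: rest, 0)
  termination_by l => l.length
  decreasing_by simp [ip_length rest h]

theorem ip_some_of_nodup (rest : List Int) : ∀ {m : Int}, (m :: rest).Nodup →
    ∃ μ zs k, ip m rest = some (μ, zs, k) := by
  induction rest with
  | nil => intro m _; exact ⟨m, [], 0, rfl⟩
  | cons y ys ih =>
    intro m h
    have hmy : m ≠ y := by
      have := (List.nodup_cons.mp h).1; simp at this; exact this.1
    by_cases h1 : y < m
    · obtain ⟨μ, zs, k, hip⟩ := ih (List.nodup_cons.mp h).2
      exact ⟨μ, m :: zs, k + 1, by simp [ip, h1, hip]⟩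
    · have hsub : (m :: ys).Sublist (m :: y :: ys) :=
        List.Sublist.cons₂ m (List.sublist_cons_self y ys)
      obtain ⟨μ, zs, k, hip⟩ := ih (h.sublist hsub)
      exact ⟨μ, y :: zs, k, by simp [ip, h1, hmy, hip]⟩

theorem ip_perm (rest : List Int) : ∀ {m μ : Int} {zs : List Int} {k : Nat},
    ip m rest = some (μ, zs, k) → (μ :: zs).Perm (m :: rest) := by
  induction rest with
  | nil => intro m μ zs k h; simp [ip] at h; simp [h.1, h.2.1]
  | cons y ys ih =>
    intro m μ zs k h
    simp only [ip] at h
    by_cases h1 : y < m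
    · rw [if_pos h1] at h
      cases hip : ip y ys with
      | none => rw [hip] at h; simp at h
      | some p =>
        obtain ⟨μ', zs', k'⟩ := p
        rw [hip, Option.map_some] at h
        simp only [Option.some.injEq, Prod.mk.injEq] at h
        obtain ⟨hA, hB, hC⟩ := h; subst hA; subst hB; subst hC
        have s1 : (μ' :: m :: zs').Perm (m :: μ' :: zs') := List.Perm.swap m μ' zs'
        exact s1.trans ((ih hip).cons m)
    · by_cases h2 : m = y
      · rw [if_neg h1, if_pos h2] at h; simp at h
      · rw [if_neg h1, if_neg h2] at h
        cases hip : ip m ys with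
        | none => rw [hip] at h; simp at h
        | some p =>
          obtain ⟨μ', zs', k'⟩ := p
          rw [hip, Option.map_some] at h
          simp only [Option.some.injEq, Prod.mk.injEq] at h
          obtain ⟨hA, hB, hC⟩ := h; subst hA; subst hB; subst hC
          have s1 : (μ' :: y :: zs').Perm (y :: μ' :: zs') := List.Perm.swap y μ' zs'
          have s3 : (y :: m :: ys).Perm (m :: y :: ys) := List.Perm.swap m y ys
          exact (s1.trans ((ih hip).cons y)).trans s3

theorem ip_min (rest : List Int) : ∀ {m μ : Int} {zs : List Int} {k : Nat},
    ip m rest = some (μ, zs, k) → ∀ x ∈ m :: rest, μ ≤ x := by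
  induction rest with
  | nil => intro m μ zs k h x hx; simp [ip] at h; simp at hx; simp [h.1, hx]
  | cons y ys ih =>
    intro m μ zs k h x hx
    simp only [ip] at h
    by_cases h1 : y < m
    · rw [if_pos h1] at h
      cases hip : ip y ys with
      | none => rw [hip] at h; simp at h
      | some p =>
        obtain ⟨μ', zs', k'⟩ := p
        rw [hip, Option.map_some] at h
        simp only [Option.some.injEq, Prod.mk.injEq] at h
        obtain ⟨hA, hB, hC⟩ := h; subst hA; subst hB; subst hC
        rcases List.mem_cons.mp hx with rfl | hx'
        · exact le_of_lt (lt_of_le_of_lt (ih hip y (by simp)) h1)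
        · exact ih hip x hx'
    · by_cases h2 : m = y
      · rw [if_neg h1, if_pos h2] at h; simp at h
      · rw [if_neg h1, if_neg h2] at h
        have hmy : m < y := lt_of_le_of_ne (not_lt.mp h1) h2
        cases hip : ip m ys with
        | none => rw [hip] at h; simp at h
        | some p =>
          obtain ⟨μ', zs', k'⟩ := p
          rw [hip, Option.map_some] at h
          simp only [Option.some.injEq, Prod.mk.injEq] at h
          obtain ⟨hA, hB, hC⟩ := h; subst hA; subst hB; subst hC
          rcases List.mem_cons.mp hx with rfl | hx'
          · exact ih hip x (by simp)
          · rcases List.mem_cons.mp hx' with rfl | hx''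
            · exact le_of_lt (lt_of_le_of_lt (ih hip m (by simp)) hmy)
            · exact ih hip x (by simp [hx''])

theorem ip_invc (rest : List Int) : ∀ {m μ : Int} {zs : List Int} {k : Nat},
    ip m rest = some (μ, zs, k) → invc (m :: rest) = invc (μ :: zs) + k := by
  induction rest with
  | nil => intro m μ zs k h; simp [ip] at h; simp [h.1, h.2.1, h.2.2]
  | cons y ys ih =>
    intro m μ zs k h
    simp only [ip] at h
    by_cases h1 : y < m
    · rw [if_pos h1] at h
      cases hip : ip y ys with
      | none => rw [hip] at h; simp at h
      | some p =>
        obtain ⟨μ', zs', k'⟩ := p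
        rw [hip, Option.map_some] at h
        simp only [Option.some.injEq, Prod.mk.injEq] at h
        obtain ⟨hA, hB, hC⟩ := h; subst hA; subst hB; subst hC
        have hperm := ip_perm ys hip
        have hmin := ip_min ys hip
        have hμm : μ' < m := lt_of_le_of_lt (hmin y (by simp)) h1
        have hzs0 : ∀ x ∈ zs', μ' ≤ x :=
          fun x hx => hmin x (hperm.subset (List.mem_cons_of_mem _ hx))
        have hcz : zs'.countP (fun z => decide (z < m)) = ys.countP (fun z => decide (z < m)) := by
          have hc := hperm.countP_eq (fun z => decide (z < m))
          simp only [List.countP_cons] at hc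
          simp [hμm, h1] at hc
          omega
        have hc0 : zs'.countP (fun z => decide (z < μ')) = 0 := by
          rw [List.countP_eq_zero]; intro x hx; simpa using not_lt.mpr (hzs0 x hx)
        have hIH := ih hip
        have e1 : decide (y < m) = true := by simp [h1]
        have e2 : decide (m < μ') = false := by simp [not_lt.mpr hμm.le]
        simp only [invc, List.countP_cons, e1, e2, hc0] at hIH ⊢
        simp at hIH ⊢
        omega
    · by_cases h2 : m = y
      · rw [if_neg h1, if_pos h2] at h; simp at h
      · rw [if_neg h1, if_neg h2] at h
        have hmy : m < y := lt_of_le_of_ne (not_lt.mp h1) h2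
        cases hip : ip m ys with
        | none => rw [hip] at h; simp at h
        | some p =>
          obtain ⟨μ', zs', k'⟩ := p
          rw [hip, Option.map_some] at h
          simp only [Option.some.injEq, Prod.mk.injEq] at h
          obtain ⟨hA, hB, hC⟩ := h; subst hA; subst hB; subst hC
          have hperm := ip_perm ys hip
          have hmin := ip_min ys hip
          have hμm : μ' ≤ m := hmin m (by simp)
          have hμy : μ' < y := lt_of_le_of_lt hμm hmy
          have hzs0 : ∀ x ∈ zs', μ' ≤ x :=
            fun x hx => hmin x (hperm.subset (List.mem_cons_of_mem _ hx))
          have hcz : zs'.countP (fun z => decide (z < y)) = ys.countP (fun z => decide (z < y)) := by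
            have hc := hperm.countP_eq (fun z => decide (z < y))
            simp only [List.countP_cons] at hc
            simp [hμy, hmy] at hc
            omega
          have hc0 : zs'.countP (fun z => decide (z < μ')) = 0 := by
            rw [List.countP_eq_zero]; intro x hx; simpa using not_lt.mpr (hzs0 x hx)
          have hIH := ih hip
          have e1 : decide (y < m) = false := by simp [not_lt.mpr hmy.le]
          have e2 : decide (y < μ') = false := by simp [not_lt.mpr hμy.le]
          simp only [invc, List.countP_cons, e1, e2, hc0] at hIH ⊢
          simp at hIH ⊢
          omega

theorem selSW_eq_some {m μ : Int} {rest zs : List Int} {k : Nat}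
    (hip : ip m rest = some (μ, zs, k)) :
    selSW (m :: rest) = (μ :: (selSW zs).1, k + (selSW zs).2) := by
  rw [selSW]
  split
  · rename_i μ' zs' k' heq
    rw [hip] at heq
    simp only [Option.some.injEq, Prod.mk.injEq] at heq
    obtain ⟨hA, hB, hC⟩ := heq; subst hA; subst hB; subst hC; rfl
  · rename_i heq
    rw [hip] at heq; simp at heq

theorem selSW_spec : ∀ (n : Nat) (seg : List Int), seg.length ≤ n → seg.Nodup →
    (selSW seg).1.Perm seg ∧ (selSW seg).1.Pairwise (· ≤ ·) ∧ (selSW seg).2 = invc seg := by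
  intro n
  induction n with
  | zero =>
    intro seg hlen _
    have : seg = [] := List.eq_nil_of_length_eq_zero (Nat.le_zero.mp hlen)
    subst this
    refine ⟨?_, ?_, ?_⟩ <;> simp [selSW, invc]
  | succ n ih =>
    intro seg hlen hnd
    cases seg with
    | nil => refine ⟨?_, ?_, ?_⟩ <;> simp [selSW, invc]
    | cons m rest =>
      obtain ⟨μ, zs, k, hip⟩ := ip_some_of_nodup rest hnd
      have hperm := ip_perm rest hip
      have hmin := ip_min rest hip
      have hzlen : zs.length = rest.length := ip_length rest hip
      have hznd : zs.Nodup := (List.nodup_cons.mp (hperm.nodup_iff.mpr hnd)).2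
      obtain ⟨ihp, ihs, ihk⟩ := ih zs (by simp at hlen; omega) hznd
      have hsel := selSW_eq_some hip
      refine ⟨?_, ?_, ?_⟩
      · rw [hsel]; exact (ihp.cons μ).trans hperm
      · rw [hsel]
        exact List.pairwise_cons.mpr
          ⟨fun x hx => hmin x (hperm.subset (List.mem_cons_of_mem _ (ihp.subset hx))), ihs⟩
      · have hinv := ip_invc rest hip
        have h0 : zs.countP (fun z => decide (z < μ)) = 0 := by
          rw [List.countP_eq_zero]; intro x hx
          simpa using not_lt.mpr (hmin x (hperm.subset (List.mem_cons_of_mem _ hx)))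
        have hμz : invc (μ :: zs) = invc zs := by simp [invc, h0]
        rw [hsel]
        show k + (selSW zs).2 = invc (m :: rest)
        rw [ihk, hinv, hμz]
        omega

-- getD / set at an offset described by an append
theorem getD_at_len (pre : List Int) (x : Int) (suf : List Int) :
    (pre ++ x :: suf).getD pre.length 0 = x := by
  induction pre with
  | nil => rfl
  | cons a t ih => simpa using ih

theorem set_at_len (pre : List Int) (x v : Int) (suf : List Int) :
    (pre ++ x :: suf).set pre.length v = pre ++ v :: suf := by
  induction pre with
  | nil => rfl
  | cons a t ih => simp [ih]

theorem inner_fold_nodup (rest : List Int) : ∀ (pre mid : List Int) (m sign μ : Int)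
    (zs : List Int) (k : Nat), (m :: rest).Nodup → ip m rest = some (μ, zs, k) →
    (List.range' (pre.length + 1 + mid.length) rest.length).foldl
        (fun st j => aStep pre.length j st) (Sum.inl (pre ++ m :: (mid ++ rest), sign))
      = Sum.inl (pre ++ μ :: (mid ++ zs), sign * (-1) ^ k) := by
  induction rest with
  | nil =>
    intro pre mid m sign μ zs k _ hip
    simp only [ip, Option.some.injEq, Prod.mk.injEq] at hip
    obtain ⟨hA, hB, hC⟩ := hip; subst hA; subst hB; subst hC
    simp
  | cons y ys ih =>
    intro pre mid m sign μ zs k hnd hip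
    have hjlen : pre.length + 1 + mid.length = (pre ++ m :: mid).length := by
      simp only [List.length_append, List.length_cons]; omega
    have hvi : (pre ++ m :: (mid ++ y :: ys)).getD pre.length 0 = m :=
      getD_at_len pre m (mid ++ y :: ys)
    have hL : pre ++ m :: (mid ++ y :: ys) = (pre ++ m :: mid) ++ y :: ys := by simp
    have hvj : (pre ++ m :: (mid ++ y :: ys)).getD (pre.length + 1 + mid.length) 0 = y := by
      rw [hL, hjlen]; exact getD_at_len _ y ys
    rw [List.length_cons, List.range'_succ, List.foldl_cons]
    simp only [ip] at hip
    by_cases h1 : y < m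
    · rw [if_pos h1] at hip
      cases hip' : ip y ys with
      | none => rw [hip'] at hip; simp at hip
      | some p =>
        obtain ⟨μ', zs', k'⟩ := p
        rw [hip', Option.map_some] at hip
        simp only [Option.some.injEq, Prod.mk.injEq] at hip
        obtain ⟨hA, hB, hC⟩ := hip; subst hA; subst hB; subst hC
        have hset : ((pre ++ m :: (mid ++ y :: ys)).set pre.length y).set
            (pre.length + 1 + mid.length) m = pre ++ y :: ((mid ++ [m]) ++ ys) := by
          rw [set_at_len pre m y (mid ++ y :: ys)]
          rw [show pre ++ y :: (mid ++ y :: ys) = (pre ++ y :: mid) ++ y :: ys by simp]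
          rw [show pre.length + 1 + mid.length = (pre ++ y :: mid).length by
            simp only [List.length_append, List.length_cons]; omega]
          rw [set_at_len (pre ++ y :: mid) y m ys]
          simp
        have hstep : aStep pre.length (pre.length + 1 + mid.length)
            (Sum.inl (pre ++ m :: (mid ++ y :: ys), sign))
            = Sum.inl (pre ++ y :: ((mid ++ [m]) ++ ys), sign * (-1)) := by
          simp only [aStep, hvi, hvj, if_pos h1, hset]
        rw [hstep]
        have hnd' : (y :: ys).Nodup := (List.nodup_cons.mp hnd).2
        have hrec := ih pre (mid ++ [m]) y (sign * (-1)) μ' zs' k' hnd' hip'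
        rw [show pre.length + 1 + (mid ++ [m]).length = pre.length + 1 + mid.length + 1 by
          simp only [List.length_append, List.length_cons, List.length_nil]; omega] at hrec
        rw [hrec]
        simp only [Sum.inl.injEq, Prod.mk.injEq]
        refine ⟨by simp, ?_⟩
        rw [pow_succ]; ring
    · have h2 : m ≠ y := by
        have := (List.nodup_cons.mp hnd).1
        simp at this
        exact this.1
      rw [if_neg h1, if_neg h2] at hip
      cases hip' : ip m ys with
      | none => rw [hip'] at hip; simp at hip
      | some p =>
        obtain ⟨μ', zs', k'⟩ := p
        rw [hip', Option.map_some] at hip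
        simp only [Option.some.injEq, Prod.mk.injEq] at hip
        obtain ⟨hA, hB, hC⟩ := hip; subst hA; subst hB; subst hC
        have hstep : aStep pre.length (pre.length + 1 + mid.length)
            (Sum.inl (pre ++ m :: (mid ++ y :: ys), sign))
            = Sum.inl (pre ++ m :: ((mid ++ [y]) ++ ys), sign) := by
          simp only [aStep, hvi, hvj, if_neg h1, if_neg h2]
          simp
        rw [hstep]
        have hsub : (m :: ys).Sublist (m :: y :: ys) :=
          List.Sublist.cons₂ m (List.sublist_cons_self y ys)
        have hnd' : (m :: ys).Nodup := hnd.sublist hsub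
        have hrec := ih pre (mid ++ [y]) m sign μ' zs' k' hnd' hip'
        rw [show pre.length + 1 + (mid ++ [y]).length = pre.length + 1 + mid.length + 1 by
          simp only [List.length_append, List.length_cons, List.length_nil]; omega] at hrec
        rw [hrec]
        simp

theorem outer_fold_nodup : ∀ (n : Nat) (seg : List Int), seg.length ≤ n → seg.Nodup →
    ∀ (pre : List Int) (sign : Int) (N : Nat), N = pre.length + seg.length →
    (List.range' pre.length seg.length).foldl
        (fun st i => (List.range' (i+1) (N - (i+1))).foldl (fun st j => aStep i j st) st)
        (Sum.inl (pre ++ seg, sign))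
      = Sum.inl (pre ++ (selSW seg).1, sign * (-1) ^ (selSW seg).2) := by
  intro n
  induction n with
  | zero =>
    intro seg hlen _ pre sign N _
    have : seg = [] := List.eq_nil_of_length_eq_zero (Nat.le_zero.mp hlen)
    subst this; simp [selSW]
  | succ n ih =>
    intro seg hlen hnd pre sign N hN
    cases seg with
    | nil => simp [selSW]
    | cons m rest =>
      obtain ⟨μ, zs, k, hip⟩ := ip_some_of_nodup rest hnd
      have hperm := ip_perm rest hip
      have hzlen : zs.length = rest.length := ip_length rest hip
      have hznd : zs.Nodup := (List.nodup_cons.mp (hperm.nodup_iff.mpr hnd)).2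
      rw [List.length_cons, List.range'_succ, List.foldl_cons]
      have hcnt : N - (pre.length + 1) = rest.length := by simp at hN ⊢; omega
      have hinner := inner_fold_nodup rest pre [] m sign μ zs k hnd hip
      simp only [List.length_nil, Nat.add_zero, List.nil_append] at hinner
      have hinner' : (List.range' (pre.length + 1) (N - (pre.length + 1))).foldl
          (fun st j => aStep pre.length j st) (Sum.inl (pre ++ m :: rest, sign))
          = Sum.inl (pre ++ μ :: zs, sign * (-1) ^ k) := by
        rw [hcnt]
        simpa using hinner
      rw [hinner']
      have hrec := ih zs (by simp at hlen; omega) hznd (pre ++ [μ]) (sign * (-1) ^ k) N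
        (by simp at hN ⊢; omega)
      simp only [List.append_assoc, List.cons_append, List.nil_append, List.length_append,
        List.length_cons, List.length_nil] at hrec
      rw [hzlen] at hrec
      rw [show pre.length + (0 + 1) = pre.length + 1 by omega] at hrec
      rw [hrec, selSW_eq_some hip]
      simp only [Sum.inl.injEq, Prod.mk.injEq]
      refine ⟨by simp, ?_⟩
      rw [pow_add]; ring

-- ===== A characterized =====
theorem A_nodup (l : List Int) (h : l.Nodup) :
    sort_with_sign_py l = ((selSW l).1, (-1) ^ (selSW l).2) := by
  show (match (List.range l.length).foldl
      (fun st i => (List.range' (i+1) (l.length - (i+1))).foldl (fun st j => aStep i j st) st)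
      (Sum.inl (l, 1)) with
    | Sum.inl (r, s) => (r, s)
    | Sum.inr (r, s) => (r, s)) = _
  rw [List.range_eq_range']
  have := outer_fold_nodup l.length l (le_refl _) h [] 1 l.length (by simp)
  simp only [List.nil_append, List.length_nil] at this
  rw [this]
  simp

-- ===== B characterized =====
def crossc (a b : List Int) : Nat := (a.map (fun x => b.countP (fun y => decide (y < x)))).sum

theorem crossc_nil_right (a : List Int) : crossc a [] = 0 := by
  simp [crossc]

theorem crossc_cons_left (x : Int) (a b : List Int) :
    crossc (x :: a) b = b.countP (fun y => decide (y < x)) + crossc a b := by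
  simp [crossc]

theorem crossc_cons_right (a : List Int) (y : Int) (b : List Int) :
    crossc a (y :: b) = a.countP (fun u => decide (y < u)) + crossc a b := by
  induction a with
  | nil => simp [crossc]
  | cons u t ih =>
    simp [crossc_cons_left, List.countP_cons] at ih ⊢
    rw [ih]
    by_cases h : y < u <;> simp [h] <;> omega

theorem crossc_perm_left {a a' : List Int} (h : a.Perm a') (b : List Int) :
    crossc a b = crossc a' b := (h.map _).sum_eq

theorem crossc_perm_right' (a : List Int) {b b' : List Int} (h : b.Perm b') :
    crossc a b = crossc a b' := by
  induction a with
  | nil => rfl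
  | cons x t ih => simp [crossc_cons_left, ih, h.countP_eq]

theorem invc_append (a b : List Int) : invc (a ++ b) = invc a + invc b + crossc a b := by
  induction a with
  | nil => simp [invc, crossc]
  | cons x t ih =>
    simp only [List.cons_append, invc, List.countP_append, ih, crossc_cons_left]
    omega

theorem bMerge_spec : ∀ (fuel : Nat) (a b : List Int), a.length + b.length ≤ fuel →
    a.Pairwise (· ≤ ·) → b.Pairwise (· ≤ ·) →
    (bMerge fuel a b).1.Perm (a ++ b) ∧ (bMerge fuel a b).1.Pairwise (· ≤ ·) ∧
      (bMerge fuel a b).2 = (crossc a b : Int) := by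
  intro fuel
  induction fuel with
  | zero =>
    intro a b hlen _ _
    have ha : a = [] := List.eq_nil_of_length_eq_zero (by omega)
    have hb : b = [] := List.eq_nil_of_length_eq_zero (by omega)
    subst ha; subst hb
    exact ⟨List.Perm.refl _, List.Pairwise.nil, by simp [bMerge, crossc]⟩
  | succ fuel ih =>
    intro a b hlen hsa hsb
    cases a with
    | nil => exact ⟨by simp [bMerge], by simpa [bMerge] using hsb, by simp [bMerge, crossc]⟩
    | cons x a' =>
      cases b with
      | nil =>
        refine ⟨by simp [bMerge], by simpa [bMerge] using hsa, ?_⟩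
        simp [bMerge, crossc_nil_right]
      | cons y b' =>
        by_cases hxy : x ≤ y
        · obtain ⟨ihp, ihs, ihc⟩ := ih a' (y :: b') (by simp at hlen ⊢; omega)
            (List.pairwise_cons.mp hsa).2 hsb
          refine ⟨?_, ?_, ?_⟩
          · simp only [bMerge, if_pos hxy]
            exact (ihp.cons x)
          · simp only [bMerge, if_pos hxy]
            refine List.pairwise_cons.mpr ⟨?_, ihs⟩
            intro z hz
            rcases (List.mem_append.mp (ihp.subset hz)) with hz' | hz'
            · exact (List.pairwise_cons.mp hsa).1 z hz'
            · rcases List.mem_cons.mp hz' with rfl | hz''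
              · exact hxy
              · exact le_trans hxy ((List.pairwise_cons.mp hsb).1 z hz'')
          · simp only [bMerge, if_pos hxy]
            rw [ihc, crossc_cons_left]
            have h0 : (y :: b').countP (fun z => decide (z < x)) = 0 := by
              rw [List.countP_eq_zero]
              intro z hz
              rcases List.mem_cons.mp hz with rfl | hz'
              · simpa using not_lt.mpr hxy
              · simpa using not_lt.mpr (le_trans hxy ((List.pairwise_cons.mp hsb).1 z hz'))
            rw [h0]; simp
        · have hyx : y < x := not_le.mp hxy
          obtain ⟨ihp, ihs, ihc⟩ := ih (x :: a') b' (by simp at hlen ⊢; omega)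
            hsa (List.pairwise_cons.mp hsb).2
          refine ⟨?_, ?_, ?_⟩
          · simp only [bMerge, if_neg hxy]
            exact (ihp.cons y).trans List.perm_middle.symm
          · simp only [bMerge, if_neg hxy]
            refine List.pairwise_cons.mpr ⟨?_, ihs⟩
            intro z hz
            rcases (List.mem_append.mp (ihp.subset hz)) with hz' | hz'
            · rcases List.mem_cons.mp hz' with rfl | hz''
              · exact hyx.le
              · exact le_trans hyx.le ((List.pairwise_cons.mp hsa).1 z hz'')
            · exact (List.pairwise_cons.mp hsb).1 z hz'
          · simp only [bMerge, if_neg hxy]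
            rw [ihc, crossc_cons_right]
            have hall : (x :: a').countP (fun u => decide (y < u)) = (x :: a').length := by
              rw [List.countP_eq_length]
              intro u hu
              rcases List.mem_cons.mp hu with rfl | hu'
              · simpa using hyx
              · simpa using lt_of_lt_of_le hyx ((List.pairwise_cons.mp hsa).1 u hu')
            push_cast [hall]
            ring

theorem bMsort_spec : ∀ (fuel : Nat) (l : List Int), l.length ≤ fuel →
    (bMsort fuel l).1.Perm l ∧ (bMsort fuel l).1.Pairwise (· ≤ ·) ∧
      (bMsort fuel l).2 = (invc l : Int) := by
  intro fuel
  induction fuel with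
  | zero =>
    intro l hlen
    have : l = [] := List.eq_nil_of_length_eq_zero (by omega)
    subst this
    exact ⟨List.Perm.refl _, List.Pairwise.nil, by simp [bMsort, invc]⟩
  | succ fuel ih =>
    intro l hlen
    by_cases hsmall : l.length < 2
    · rcases l with _ | ⟨x, _ | ⟨y, t⟩⟩
      · exact ⟨by simp [bMsort], by simp [bMsort], by simp [bMsort, invc]⟩
      · exact ⟨by simp [bMsort], by simp [bMsort], by simp [bMsort, invc]⟩
      · simp at hsmall
    · have h2 : 2 ≤ l.length := not_lt.mp hsmall
      simp only [bMsort, if_neg hsmall]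
      obtain ⟨Lp, Ls, Lc⟩ := ih (l.take (l.length / 2)) (by simp; omega)
      obtain ⟨Rp, Rs, Rc⟩ := ih (l.drop (l.length / 2)) (by simp; omega)
      obtain ⟨Mp, Ms, Mc⟩ := bMerge_spec _ _ _ (le_refl _) Ls Rs
      have hsplit : l.take (l.length / 2) ++ l.drop (l.length / 2) = l :=
        List.take_append_drop _ l
      refine ⟨?_, Ms, ?_⟩
      · have hp2 : (l.take (l.length / 2) ++ l.drop (l.length / 2)).Perm l := by rw [hsplit]
        exact (Mp.trans (Lp.append Rp)).trans hp2
      · rw [Mc, Lc, Rc]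
        have hc : crossc (bMsort fuel (l.take (l.length / 2))).1
              (bMsort fuel (l.drop (l.length / 2))).1
            = crossc (l.take (l.length / 2)) (l.drop (l.length / 2)) := by
          rw [crossc_perm_left Lp, crossc_perm_right' _ Rp]
        rw [hc]
        have := invc_append (l.take (l.length / 2)) (l.drop (l.length / 2))
        rw [hsplit] at this
        rw [this]
        push_cast
        ring

theorem adjDup_false_of_nodup : ∀ (l : List Int), l.Nodup → adjDup l = false := by
  intro l
  induction l with
  | nil => intro _; rfl
  | cons x t ih =>
    intro h
    cases t with
    | nil => rfl
    | cons y t' =>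
      have hxy : x ≠ y := by
        have := (List.nodup_cons.mp h).1; simp at this; exact this.1
      simp [adjDup, hxy, ih (List.nodup_cons.mp h).2]

theorem negone_pow_mod (n : Nat) :
    (if PySem.Int.mod (n : Int) 2 ≠ 0 then (-1 : Int) else 1) = (-1) ^ n := by
  have h : PySem.Int.mod (n : Int) 2 = ((n % 2 : Nat) : Int) := by
    exact_mod_cast PySem.Int.mod_natCast n 2
  rw [h]
  rcases Nat.even_or_odd n with he | ho
  · rw [Even.neg_one_pow he]
    simp [Nat.even_iff.mp he]
  · rw [Odd.neg_one_pow ho]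
    simp [Nat.odd_iff.mp ho]

-- ===== assembly =====
theorem B_nodup (l : List Int) (h : l.Nodup) :
    sort_with_sign_py_alt l = ((bMsort l.length l).1, (-1) ^ invc l) := by
  obtain ⟨hp, _, hc⟩ := bMsort_spec l.length l (le_refl _)
  show (if adjDup (bMsort l.length l).1 then ((bMsort l.length l).1, 0)
      else ((bMsort l.length l).1,
        if PySem.Int.mod (bMsort l.length l).2 2 ≠ 0 then -1 else 1)) = _
  rw [adjDup_false_of_nodup _ (hp.nodup_iff.mpr h)]
  simp only [Bool.false_eq_true, if_false, hc, negone_pow_mod]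

-- ===== VERDICT (by name: the statement is the Claim_ definition above) =====
theorem sort_with_sign_py_spec : Claim_equal_sort_with_sign_py := by
  intro idx _ hnd
  obtain ⟨hp, hsort, _⟩ := bMsort_spec idx.length idx (le_refl _)
  obtain ⟨sp, ss, sk⟩ := selSW_spec idx.length idx (le_refl _) hnd
  have hlists : (selSW idx).1 = (bMsort idx.length idx).1 :=
    (sp.trans hp.symm).eq_of_pairwise (fun _ _ _ _ h1 h2 => le_antisymm h1 h2) ss hsort
  show sort_with_sign_py idx = sort_with_sign_py_alt idx
  rw [A_nodup idx hnd, B_nodup idx hnd, hlists, sk]
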